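-- pv_equiv track=rewrite | github.com/okeyokoro/practice | judged/hackerrank/.ipynb_checkpoints/largest-subsquare-side-checkpoint.py | largestSubsquareSide
-- ===== SOURCE A (Python) =====
-- def largestSubsquareSide(grid, k):
--     # input is square, output is square rows = columns
--     # Here is an example sub-grid dimension (<= rows_of_grid, <= columns_of_grid )
--     # The goal is to find the largest sub-grid dimension such that ANY subgrid of that dimension
--     # contains elements that when summed; have a value less than k
--
--     # start from the largest possible square grid
--     grid_dim = len(grid)
--     dimension = grid_dim
--
--     def subgrid_sum(dimension, grid, row, col):
--         """ Given an element of grid[row][col]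
--         find all the elements needed to form a subgrid
--
--         (lets treat the current element as the top-left element,
--          <then add the remaining columns needed from that row>,
--          go to the next row,
--          <then add the columns needed from that row>
--          then go to the required c)
--
--         and add them up
--         """
--         count = 0
--         for r in range(row, row+dimension):
--             for c in range(col, col+dimension):
--                 try:
--                     count += grid[r][c]
--                 except IndexError:
--                     # if there is an IndexError then this is element cannot form a subgrid
--                     return 0
--         return count
--
--     while dimension > 0:
--         # generate a list containing the sum of items in a subgrid; for all subgrids; for a given dimension
--         subgrid_sums = []
--
--         # do a search in the number of directions needed. per elements
--         # if dimension is 1; then no search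
--         # if dimension is 2; then 2**2 - 1 other elements to add to subgrids
--         # if dimension is 3; then 3**3 -1 other elements to add to subgrid
--         for row in range(grid_dim):
--             for col in range(grid_dim):
--                 subgrid = subgrid_sum(dimension, grid, row, col)
--                 subgrid_sums.append(subgrid)
--
--         # if max(list of sums) is not greater than k; not max(list_of_sums) > k; return k
--         if not max(subgrid_sums) > k:
--             return dimension
--
--         dimension -= 1
--
--     return 0
-- ===== SOURCE B (Python) =====
-- def largestSubsquareSide(grid, k):
--     # per-row prefix sums; a d x d window sum is d O(1) row-range differences,
--     # out-of-bounds window placements count as 0 (as in the original)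
--     n = len(grid)
--     prefs = []
--     for row in grid:
--         p = [0]
--         for v in row:
--             p.append(p[-1] + v)
--         prefs.append(p)
--     lens = [len(row) for row in grid]
--     for d in range(n, 0, -1):
--         mx = None
--         for row in range(n):
--             for col in range(n):
--                 if row + d <= n and all(col + d <= lens[r] for r in range(row, row + d)):
--                     s = sum(prefs[r][col + d] - prefs[r][col] for r in range(row, row + d))
--                 else:
--                     s = 0
--                 if mx is None or s > mx:
--                     mx = s
--         if mx is not None and mx <= k:
--             return d
--     return 0
-- ===== Notes on version B (the rewrite author's own statement) =====
-- stated objective: faster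
-- what changed: B precomputes per-row prefix sums and row lengths once, so each d x d window is evaluated as d O(1) prefix differences after an explicit bounds check, instead of A's per-window O(d^2) element-by-element re-summation guarded by try/except; the descending-dimension scan keeps a running max instead of materialising the list of all window sums.
import Mathlib
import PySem

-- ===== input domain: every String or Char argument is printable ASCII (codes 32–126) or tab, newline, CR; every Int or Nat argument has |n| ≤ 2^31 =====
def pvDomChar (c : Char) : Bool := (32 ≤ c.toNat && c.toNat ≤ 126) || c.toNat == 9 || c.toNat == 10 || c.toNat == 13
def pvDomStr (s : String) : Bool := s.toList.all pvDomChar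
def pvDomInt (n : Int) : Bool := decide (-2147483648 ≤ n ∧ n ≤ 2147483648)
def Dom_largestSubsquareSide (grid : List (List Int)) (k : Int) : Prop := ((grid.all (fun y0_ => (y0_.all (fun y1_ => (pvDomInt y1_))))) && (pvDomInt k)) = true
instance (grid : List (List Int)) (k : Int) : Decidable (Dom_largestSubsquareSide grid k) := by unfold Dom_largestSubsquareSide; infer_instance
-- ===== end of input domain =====

-- B replaces A's per-window O(d^2) re-summation (inside an O(n^2)·O(n) scan) by per-row
-- prefix sums, so each d×d window costs O(d) range differences: O(n^4) instead of O(n^5).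

-- ===== PORT A =====

-- inner 'for c in range(col, col+dimension)' of subgrid_sum; none = IndexError was raised
def sgRow (grid : List (List Int)) (r : Int) : List Int → Int → Option Int
  | [], acc => some acc
  | c :: cs, acc =>
    match PySem.List.pyGet? grid r with
    | none => none
    | some rowl =>
      match PySem.List.pyGet? rowl c with
      | none => none
      | some v => sgRow grid r cs (acc + v)

-- outer 'for r in range(row, row+dimension)' of subgrid_sum
def sgGo (grid : List (List Int)) (cols : List Int) : List Int → Int → Option Int
  | [], acc => some acc
  | r :: rs, acc =>
    match sgRow grid r cols acc with
    | none => none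
    | some acc' => sgGo grid cols rs acc'

-- subgrid_sum: 'except IndexError: return 0'
def subgridSum (dimension : Int) (grid : List (List Int)) (row col : Int) : Int :=
  match sgGo grid (PySem.List.pyRange col (col + dimension) 1)
               (PySem.List.pyRange row (row + dimension) 1) 0 with
  | some c => c
  | none => 0

-- 'while dimension > 0' loop, structural on the current dimension
def aLoop (grid : List (List Int)) (k : Int) (gridDim : Int) : Nat → Int
  | 0 => 0
  | d + 1 =>
    let sums := (PySem.List.pyRange 0 gridDim 1).foldl
      (fun acc row => (PySem.List.pyRange 0 gridDim 1).foldl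
        (fun acc col => acc ++ [subgridSum ((d : Int) + 1) grid row col]) acc) []
    match PySem.List.max? sums (fun x => x) with
    | some m => if ¬ (m > k) then ((d : Int) + 1) else aLoop grid k gridDim d
    | none => aLoop grid k gridDim d   -- max() on []; unreachable: the loop runs only when gridDim ≥ dimension ≥ 1

def largestSubsquareSide (grid : List (List Int)) (k : Int) : Int :=
  aLoop grid k (grid.length : Int) grid.length

-- ===== PORT B =====

-- running prefix sums of one row: p = [0]; for v in row: p.append(p[-1] + v)
def prefGo : List Int → Int → List Int
  | [], _ => []
  | v :: vs, acc => (acc + v) :: prefGo vs (acc + v)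

def prefRow (row : List Int) : List Int := 0 :: prefGo row 0

-- 'row + d <= n and all(col + d <= lens[r] for r in range(row, row + d))'
def windowOk (lens : List Nat) (n d row col : Nat) : Bool :=
  decide (row + d ≤ n) && (List.range' row d).all (fun r => decide (col + d ≤ lens.getD r 0))

-- 'sum(prefs[r][col + d] - prefs[r][col] for r in range(row, row + d))'
def windowSum (prefs : List (List Int)) (d row col : Nat) : Int :=
  ((List.range' row d).map (fun r => (prefs.getD r []).getD (col + d) 0 - (prefs.getD r []).getD col 0)).sum

-- 'if mx is None or s > mx: mx = s'
def bUpd (mx : Option Int) (s : Int) : Option Int :=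
  match mx with
  | none => some s
  | some m => some (if s > m then s else m)

-- the two 'for row/col in range(n)' loops accumulating mx
def bMax (prefs : List (List Int)) (lens : List Nat) (n d : Nat) : Option Int :=
  (List.range n).foldl
    (fun mx row => (List.range n).foldl
      (fun mx col => bUpd mx (if windowOk lens n d row col then windowSum prefs d row col else 0)) mx)
    none

-- 'for d in range(n, 0, -1)'
def bLoop (prefs : List (List Int)) (lens : List Nat) (n : Nat) (k : Int) : Nat → Int
  | 0 => 0
  | d + 1 =>
    match bMax prefs lens n (d + 1) with
    | some m => if m ≤ k then ((d : Int) + 1) else bLoop prefs lens n k d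
    | none => bLoop prefs lens n k d   -- 'mx is not None' fails only when n = 0, and then the loop body never runs

def largestSubsquareSide_alt (grid : List (List Int)) (k : Int) : Int :=
  bLoop (grid.map prefRow) (grid.map List.length) grid.length k grid.length

-- ===== PRECONDITION & SPEC =====

def Spec_largestSubsquareSide (grid : List (List Int)) (k : Int) (out : Int) : Prop :=
  out = largestSubsquareSide_alt grid k

instance (grid : List (List Int)) (k : Int) (out : Int) : Decidable (Spec_largestSubsquareSide grid k out) := by
  unfold Spec_largestSubsquareSide; infer_instance

-- ===== CLAIM =====

def Claim_equal_largestSubsquareSide : Prop :=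
  ∀ (grid : List (List Int)) (k : Int), Dom_largestSubsquareSide grid k →
    Spec_largestSubsquareSide grid k (largestSubsquareSide grid k)

-- ===== LEMMAS AND PROOFS =====

-- the 'box' both programs sum over a d×d in-bounds window
def boxSum (grid : List (List Int)) (d row col : Nat) : Int :=
  ((List.range' row d).map (fun r =>
    ((List.range' col d).map (fun c => (grid.getD r []).getD c 0)).sum)).sum

lemma prefGo_getD (L : List Int) (acc : Int) (j : Nat) (hj : j < L.length) :
    (prefGo L acc).getD j 0 = acc + (L.take (j + 1)).sum := by
  induction L generalizing acc j with
  | nil => simp at hj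
  | cons v vs ih =>
    cases j with
    | zero => simp [prefGo]
    | succ j =>
      simp only [prefGo, List.getD_cons_succ, List.take_succ_cons, List.sum_cons]
      rw [ih (acc + v) j (by simpa using hj)]
      ring

lemma prefRow_getD (L : List Int) (j : Nat) (hj : j ≤ L.length) :
    (prefRow L).getD j 0 = (L.take j).sum := by
  cases j with
  | zero => simp [prefRow]
  | succ j =>
    simp only [prefRow, List.getD_cons_succ]
    exact prefGo_getD L 0 j (by omega) |>.trans (by simp)

lemma take_sum_split (L : List Int) (col d : Nat) (h : col + d ≤ L.length) :
    (L.take (col + d)).sum = (L.take col).sum + ((List.range' col d).map (fun c => L.getD c 0)).sum := by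
  induction d with
  | zero => simp
  | succ d ih =>
    rw [List.range'_concat]
    have hcd : col + d < L.length := by omega
    rw [show col + (d + 1) = (col + d) + 1 by ring, List.take_add_one]
    simp only [List.map_append, List.sum_append, List.map_cons, List.map_nil, List.sum_cons,
      List.sum_nil]
    rw [ih (by omega)]
    have : L[col + d]? = some L[col + d] := List.getElem?_eq_getElem hcd
    simp [this, List.getD]
    ring_nf

lemma rowSum_eq (L : List Int) (col d : Nat) (h : col + d ≤ L.length) :
    (prefRow L).getD (col + d) 0 - (prefRow L).getD col 0
      = ((List.range' col d).map (fun c => L.getD c 0)).sum := by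
  rw [prefRow_getD L (col + d) h, prefRow_getD L col (by omega), take_sum_split L col d h]
  ring

-- characterisation of A's inner column loop
lemma sgRow_char (grid : List (List Int)) (r : Nat) (hr : r < grid.length) (d : Nat) :
    ∀ (col : Nat) (acc : Int),
    sgRow grid (r : Int) (PySem.List.pyRange (col : Int) ((col + d : Nat) : Int) 1) acc =
      if ∀ c ∈ List.range' col d, c < (grid.getD r []).length then
        some (acc + ((List.range' col d).map (fun c => (grid.getD r []).getD c 0)).sum)
      else none := by
  induction d with
  | zero => intro col acc; simp [PySem.List.pyRange_one_eq_nil, sgRow]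
  | succ d ih =>
    intro col acc
    have hcons : PySem.List.pyRange (col : Int) ((col + (d + 1) : Nat) : Int) 1
        = (col : Int) :: PySem.List.pyRange ((col : Int) + 1) ((col + (d + 1) : Nat) : Int) 1 :=
      PySem.List.pyRange_one_cons (by push_cast; omega)
    rw [hcons]
    have hget : PySem.List.pyGet? grid (r : Int) = some (grid.getD r []) := by
      rw [PySem.List.pyGet?_natCast, List.getElem?_eq_getElem hr, List.getD_eq_getElem _ [] hr]
    by_cases hc : col < (grid.getD r []).length
    · have hgc : PySem.List.pyGet? (grid.getD r []) (col : Int)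
          = some ((grid.getD r []).getD col 0) := by
        rw [PySem.List.pyGet?_natCast, List.getElem?_eq_getElem hc, List.getD_eq_getElem _ 0 hc]
      simp only [sgRow, hget, hgc]
      have hc1 : ((col : Int) + 1) = ((col + 1 : Nat) : Int) := by push_cast; ring
      have hd1 : ((col + (d + 1) : Nat) : Int) = (((col + 1) + d : Nat) : Int) := by push_cast; ring
      rw [hc1, hd1, ih (col + 1)]
      rw [List.range'_succ]
      by_cases hall : ∀ c ∈ List.range' (col + 1) d 1, c < (grid.getD r []).length
      · have : ∀ c ∈ col :: List.range' (col + 1) d 1, c < (grid.getD r []).length := by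
          intro c hcm; rcases List.mem_cons.1 hcm with h | h
          · exact h ▸ hc
          · exact hall c h
        simp only [if_pos hall, if_pos this, List.map_cons, List.sum_cons]
        congr 1; ring
      · have : ¬ ∀ c ∈ col :: List.range' (col + 1) d 1, c < (grid.getD r []).length := by
          intro h; exact hall (fun c hcm => h c (List.mem_cons_of_mem _ hcm))
        rw [if_neg hall, if_neg this]
    · have hgc : PySem.List.pyGet? (grid.getD r []) (col : Int) = none := by
        rw [PySem.List.pyGet?_natCast, List.getElem?_eq_none_iff.2 (by omega)]
      simp only [sgRow, hget, hgc]
      have : ¬ ∀ c ∈ List.range' col (d + 1) 1, c < (grid.getD r []).length := by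
        intro h
        exact hc (h col (by rw [List.range'_succ]; exact List.mem_cons_self))
      rw [if_neg this]

-- for d ≥ 1 the 'all indices valid' condition is the interval bound
lemma all_lt_iff (col d L : Nat) :
    (∀ c ∈ List.range' col (d + 1), c < L) ↔ col + (d + 1) ≤ L := by
  constructor
  · intro h
    have := h (col + d) (List.mem_range'_1.2 ⟨by omega, by omega⟩)
    omega
  · intro h c hc
    have := List.mem_range'_1.1 hc
    omega

-- characterisation of A's outer row loop: m rows starting at 'row', window width d+1
lemma sgGo_char (grid : List (List Int)) (col d : Nat) (m : Nat) :
    ∀ (row : Nat) (acc : Int),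
    sgGo grid (PySem.List.pyRange (col : Int) ((col + (d + 1) : Nat) : Int) 1)
      (PySem.List.pyRange (row : Int) ((row + m : Nat) : Int) 1) acc =
      if ∀ r ∈ List.range' row m, r < grid.length ∧ col + (d + 1) ≤ (grid.getD r []).length then
        some (acc + ((List.range' row m).map (fun r =>
          ((List.range' col (d + 1)).map (fun c => (grid.getD r []).getD c 0)).sum)).sum)
      else none := by
  induction m with
  | zero => intro row acc; simp [PySem.List.pyRange_one_eq_nil, sgGo]
  | succ m ih =>
    intro row acc
    have hcons : PySem.List.pyRange (row : Int) ((row + (m + 1) : Nat) : Int) 1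
        = (row : Int) :: PySem.List.pyRange ((row : Int) + 1) ((row + (m + 1) : Nat) : Int) 1 :=
      PySem.List.pyRange_one_cons (by push_cast; omega)
    rw [hcons]
    by_cases hrow : row < grid.length
    · by_cases hclen : col + (d + 1) ≤ (grid.getD row []).length
      · have hsg : sgRow grid (row : Int)
            (PySem.List.pyRange (col : Int) ((col + (d + 1) : Nat) : Int) 1) acc
            = some (acc + ((List.range' col (d + 1)).map (fun c => (grid.getD row []).getD c 0)).sum) := by
          rw [sgRow_char grid row hrow (d + 1) col acc, if_pos ((all_lt_iff col d _).2 hclen)]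
        simp only [sgGo, hsg]
        have hr1 : ((row : Int) + 1) = ((row + 1 : Nat) : Int) := by push_cast; ring
        have hm1 : ((row + (m + 1) : Nat) : Int) = (((row + 1) + m : Nat) : Int) := by push_cast; ring
        rw [hr1, hm1, ih (row + 1)]
        rw [show List.range' row (m + 1) = row :: List.range' (row + 1) m from List.range'_succ]
        by_cases hall : ∀ r ∈ List.range' (row + 1) m 1, r < grid.length ∧ col + (d + 1) ≤ (grid.getD r []).length
        · have : ∀ r ∈ row :: List.range' (row + 1) m 1, r < grid.length ∧ col + (d + 1) ≤ (grid.getD r []).length := by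
            intro r hrm; rcases List.mem_cons.1 hrm with h | h
            · exact h ▸ ⟨hrow, hclen⟩
            · exact hall r h
          simp only [if_pos hall, if_pos this, List.map_cons, List.sum_cons]
          congr 1; ring
        · have : ¬ ∀ r ∈ row :: List.range' (row + 1) m 1, r < grid.length ∧ col + (d + 1) ≤ (grid.getD r []).length := by
            intro h; exact hall (fun r hrm => h r (List.mem_cons_of_mem _ hrm))
          rw [if_neg hall, if_neg this]
      · have hsg : sgRow grid (row : Int)
            (PySem.List.pyRange (col : Int) ((col + (d + 1) : Nat) : Int) 1) acc = none := by
          rw [sgRow_char grid row hrow (d + 1) col acc,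
            if_neg (fun h => hclen ((all_lt_iff col d _).1 h))]
        simp only [sgGo, hsg]
        have : ¬ ∀ r ∈ List.range' row (m + 1) 1, r < grid.length ∧ col + (d + 1) ≤ (grid.getD r []).length := by
          intro h
          exact hclen (h row (by rw [List.range'_succ]; exact List.mem_cons_self)).2
        rw [if_neg this]
    · -- row out of range: first grid[r][c] raises (cols is nonempty since width d+1 ≥ 1)
      have hsg : sgRow grid (row : Int)
          (PySem.List.pyRange (col : Int) ((col + (d + 1) : Nat) : Int) 1) acc = none := by
        rw [PySem.List.pyRange_one_cons (a := (col : Int)) (by push_cast; omega)]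
        have hget : PySem.List.pyGet? grid (row : Int) = none := by
          rw [PySem.List.pyGet?_natCast, List.getElem?_eq_none_iff.2 (by omega)]
        simp only [sgRow, hget]
      simp only [sgGo, hsg]
      have : ¬ ∀ r ∈ List.range' row (m + 1) 1, r < grid.length ∧ col + (d + 1) ≤ (grid.getD r []).length := by
        intro h
        exact hrow (h row (by rw [List.range'_succ]; exact List.mem_cons_self)).1
      rw [if_neg this]

-- lens[r] in B is the length of row r of the grid (both sides default to 0 past the end)
lemma lens_getD (grid : List (List Int)) (r : Nat) :
    (grid.map List.length).getD r 0 = (grid.getD r []).length := by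
  by_cases hr : r < grid.length
  · simp [List.getD, hr]
  · rw [List.getD_eq_default _ _ (by simpa using (by omega : grid.length ≤ r)),
        List.getD_eq_default _ _ (by omega)]
    simp

-- the per-window agreement: A's subgrid_sum equals B's guarded prefix-difference value
lemma window_eq (grid : List (List Int)) (d row col : Nat) :
    subgridSum ((d : Int) + 1) grid (row : Int) (col : Int)
      = if windowOk (grid.map List.length) grid.length (d + 1) row col
        then windowSum (grid.map prefRow) (d + 1) row col else 0 := by
  unfold subgridSum
  have hcol : (col : Int) + ((d : Int) + 1) = ((col + (d + 1) : Nat) : Int) := by push_cast; ring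
  have hrow : (row : Int) + ((d : Int) + 1) = ((row + (d + 1) : Nat) : Int) := by push_cast; ring
  rw [hcol, hrow, sgGo_char grid col d (d + 1) row 0]
  have hcond : (∀ r ∈ List.range' row (d + 1), r < grid.length ∧ col + (d + 1) ≤ (grid.getD r []).length)
      ↔ windowOk (grid.map List.length) grid.length (d + 1) row col := by
    unfold windowOk
    rw [Bool.and_eq_true, List.all_eq_true]
    constructor
    · intro h
      constructor
      · exact decide_eq_true ((all_lt_iff row d grid.length).1 (fun r hr => (h r hr).1))
      · intro r hr
        exact decide_eq_true (by rw [lens_getD]; exact (h r hr).2)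
    · rintro ⟨h1, h2⟩ r hr
      refine ⟨(all_lt_iff row d grid.length).2 (of_decide_eq_true h1) r hr, ?_⟩
      have := of_decide_eq_true (h2 r hr)
      rwa [lens_getD] at this
  by_cases h : windowOk (grid.map List.length) grid.length (d + 1) row col
  · rw [if_pos (hcond.2 h), if_pos h]
    unfold windowSum
    rw [zero_add]
    apply congrArg List.sum
    apply List.map_congr_left
    intro r hr
    have hrlt : r < grid.length := (hcond.2 h r hr).1
    have hle : col + (d + 1) ≤ (grid.getD r []).length := (hcond.2 h r hr).2
    have hpref : (grid.map prefRow).getD r [] = prefRow (grid.getD r []) := by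
      simp [List.getD, hrlt]
    rw [hpref, rowSum_eq _ col (d + 1) hle]
  · rw [if_neg (fun hh => h (hcond.1 hh)), if_neg h]

-- folding B's running-max update over a list computes Python's max() of that list
lemma foldl_bUpd_some (t : List Int) : ∀ (m : Int),
    t.foldl bUpd (some m) = some (t.foldl max m) := by
  induction t with
  | nil => intro m; rfl
  | cons x t ih =>
    intro m
    have : bUpd (some m) x = some (max m x) := by
      unfold bUpd
      by_cases h : x > m
      · simp [h, max_eq_right h.le]
      · simp [h, max_eq_left (not_lt.mp h)]
    simp only [List.foldl_cons, this, ih]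

lemma foldl_bUpd_eq_max? (L : List Int) :
    L.foldl bUpd none = PySem.List.max? L (fun y => y) := by
  cases L with
  | nil => rfl
  | cons x t => rw [PySem.List.max?_id_cons, List.foldl_cons, show bUpd none x = some x from rfl,
      foldl_bUpd_some]

-- a nested foldl of a plain accumulator update is the fold over the flattened value list
lemma foldl_nested (f : Option Int → Int → Option Int) (W : Nat → Nat → Int) (l₁ l₂ : List Nat) :
    ∀ (init : Option Int),
    l₁.foldl (fun mx row => l₂.foldl (fun mx col => f mx (W row col)) mx) init
      = (l₁.flatMap (fun row => l₂.map (fun col => W row col))).foldl f init := by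
  induction l₁ with
  | nil => intro init; rfl
  | cons r rs ih =>
    intro init
    rw [List.foldl_cons, List.flatMap_cons, List.foldl_append, ih, List.foldl_map]

-- A's subgrid_sums list, flattened, with each entry rewritten by window_eq
lemma sums_eq (grid : List (List Int)) (d : Nat) :
    (PySem.List.pyRange 0 (grid.length : Int) 1).foldl
      (fun acc row => (PySem.List.pyRange 0 (grid.length : Int) 1).foldl
        (fun acc col => acc ++ [subgridSum ((d : Int) + 1) grid row col]) acc) []
    = (List.range grid.length).flatMap (fun row => (List.range grid.length).map (fun col =>
        if windowOk (grid.map List.length) grid.length (d + 1) row col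
        then windowSum (grid.map prefRow) (d + 1) row col else 0)) := by
  have hrange : PySem.List.pyRange 0 (grid.length : Int) 1
      = (List.range grid.length).map (fun (k : Nat) => (k : Int)) := PySem.List.pyRange_zero_nat _
  rw [hrange]
  simp only [PySem.List.foldl_append_singleton_eq_map, PySem.List.foldl_append_eq_flatMap,
    List.nil_append]
  rw [List.flatMap_map]
  congr 1
  funext row
  rw [List.map_map]
  congr 1
  funext col
  exact window_eq grid d row col

-- the two descending-dimension loops agree at every dimension
lemma loop_eq (grid : List (List Int)) (k : Int) : ∀ (d : Nat),
    aLoop grid k (grid.length : Int) d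
      = bLoop (grid.map prefRow) (grid.map List.length) grid.length k d := by
  intro d
  induction d with
  | zero => rfl
  | succ d ih =>
    unfold aLoop bLoop
    simp only [sums_eq grid d]
    have hb : bMax (grid.map prefRow) (grid.map List.length) grid.length (d + 1)
        = PySem.List.max? ((List.range grid.length).flatMap (fun row =>
            (List.range grid.length).map (fun col =>
              if windowOk (grid.map List.length) grid.length (d + 1) row col
              then windowSum (grid.map prefRow) (d + 1) row col else 0))) (fun y => y) := by
      unfold bMax
      rw [foldl_nested bUpd (fun row col =>
          if windowOk (grid.map List.length) grid.length (d + 1) row col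
          then windowSum (grid.map prefRow) (d + 1) row col else 0)
        (List.range grid.length) (List.range grid.length) none, foldl_bUpd_eq_max?]
    rw [← hb]
    cases bMax (grid.map prefRow) (grid.map List.length) grid.length (d + 1) with
    | none => exact ih
    | some m =>
      simp only [not_lt, ih]

-- ===== VERDICT =====

theorem largestSubsquareSide_spec : Claim_equal_largestSubsquareSide := by
  intro grid k _hdom
  unfold Spec_largestSubsquareSide largestSubsquareSide largestSubsquareSide_alt
  exact loop_eq grid k grid.length
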